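-- pv_equiv track=rewrite | github.com/VyacheslavZalygin/PyEducation2021 | RecursionAndCombinatorics/p6.py | sequences
-- ===== SOURCE A (Python) =====
-- def sequences(free):
--   if len(free) == 1:
--     return [[free[0]]]
--   a = [[head] for head in free]
--   for head in free:
--     for tail in sequences([x for x in free if x != head]):
--       a.append([head, *tail])
--   return a
-- ===== SOURCE B (Python) =====
-- def sequences(free):
--     memo = {}
--
--     def go(t):
--         hit = memo.get(t)
--         if hit is not None:
--             return hit
--         res = [[h] for h in t]
--         for h in t:
--             for tail in go(tuple(x for x in t if x != h)):
--                 res.append([h] + tail)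
--         memo[t] = res
--         return res
--
--     return go(tuple(free))
-- ===== Notes on version B (the rewrite author's own statement) =====
-- stated objective: faster
-- what changed: B memoizes the recursion with a dict keyed by the exact ordered sublist tuple, so each distinct filtered subproblem is computed once instead of being recomputed along every recursion path.
import Mathlib
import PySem

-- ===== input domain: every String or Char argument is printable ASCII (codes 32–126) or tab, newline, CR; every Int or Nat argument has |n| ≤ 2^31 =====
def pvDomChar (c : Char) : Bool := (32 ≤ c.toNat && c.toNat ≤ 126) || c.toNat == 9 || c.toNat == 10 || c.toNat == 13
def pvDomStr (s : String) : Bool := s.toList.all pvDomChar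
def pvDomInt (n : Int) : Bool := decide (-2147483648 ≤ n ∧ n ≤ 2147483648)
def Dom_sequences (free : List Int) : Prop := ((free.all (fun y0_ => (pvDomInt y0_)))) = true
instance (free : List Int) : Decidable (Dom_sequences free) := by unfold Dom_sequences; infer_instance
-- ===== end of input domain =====

-- B memoizes the recursion on the filtered sublist (dict keyed by the exact ordered sublist),
-- intending to compute each distinct subproblem once instead of once per recursion path.

-- termination helper: removing all copies of a present element strictly shrinks the list
theorem pv_filter_ne_lt {a : Int} {l : List Int} (h : a ∈ l) :
    (l.filter (fun x => decide (x ≠ a))).length < l.length := by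
  induction l with
  | nil => cases h
  | cons b bs ih =>
    rcases List.mem_cons.mp h with rfl | hb
    · simp only [List.filter_cons, decide_not]
      have := List.length_filter_le (fun x => !decide (x = a)) bs
      simp only [ne_eq, decide_not] at *
      simp [List.length_cons]
      omega
    · by_cases hba : b = a
      · subst hba
        simp only [List.filter_cons, ne_eq, decide_not]
        simp
        have := List.length_filter_le (fun x => !decide (x = b)) bs
        omega
      · simp only [List.filter_cons, ne_eq, decide_not]
        have := ih hb
        simp [hba]
        omega

-- ===== PORT A =====
mutual
  -- A's body: the len==1 base case, the list of singletons, then the loop over heads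
  def sequences (free : List Int) : List (List Int) :=
    if free.length = 1 then
      [[free.headI]]
    else
      seqLoopA free free.attach (free.map (fun head => [head]))
  termination_by (free.length, free.length + 1)
  decreasing_by
    apply Prod.Lex.right
    simp

  -- the 'for head in free' loop of A (a is the accumulator list)
  def seqLoopA (free : List Int) (hs : List {x // x ∈ free}) (a : List (List Int)) :
      List (List Int) :=
    match hs with
    | [] => a
    | h :: rest =>
      seqLoopA free rest
        (a ++ (sequences (free.filter (fun x => decide (x ≠ h.1)))).map (fun tail => h.1 :: tail))
  termination_by (free.length, hs.length)
  decreasing_by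
    · exact Prod.Lex.left _ _ (pv_filter_ne_lt h.2)
    · apply Prod.Lex.right; simp
end

-- ===== PORT B =====
mutual
  -- B's go(t): dict lookup, compute once, store
  def seqGo (memo : PySem.Dict (List Int) (List (List Int))) (t : List Int) :
      PySem.Dict (List Int) (List (List Int)) × List (List Int) :=
    match memo.get? t with
    | some v => (memo, v)
    | none =>
      let p := seqLoopB t t.attach (memo, t.map (fun h => [h]))
      (p.1.insert t p.2, p.2)
  termination_by (t.length, t.length + 1)
  decreasing_by
    apply Prod.Lex.right
    simp

  -- B's 'for h in t' loop, threading the memo dict through the recursive calls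
  def seqLoopB (t : List Int) (hs : List {x // x ∈ t})
      (p : PySem.Dict (List Int) (List (List Int)) × List (List Int)) :
      PySem.Dict (List Int) (List (List Int)) × List (List Int) :=
    match hs with
    | [] => p
    | h :: rest =>
      let q := seqGo p.1 (t.filter (fun x => decide (x ≠ h.1)))
      seqLoopB t rest (q.1, p.2 ++ q.2.map (fun tail => h.1 :: tail))
  termination_by (t.length, hs.length)
  decreasing_by
    · exact Prod.Lex.left _ _ (pv_filter_ne_lt h.2)
    · apply Prod.Lex.right; simp
end

def sequences_alt (free : List Int) : List (List Int) :=
  (seqGo PySem.Dict.empty free).2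

-- ===== PRECONDITION & SPEC =====
def Spec_sequences (free : List Int) (out : List (List Int)) : Prop := out = sequences_alt free
instance (free : List Int) (out : List (List Int)) : Decidable (Spec_sequences free out) := by unfold Spec_sequences; infer_instance

-- ===== CLAIM (what is proved, stated in full; the proofs are below) =====
def Claim_equal_sequences : Prop := ∀ (free : List Int), Dom_sequences free → Spec_sequences free (sequences free)

-- ===== LEMMAS AND PROOFS =====

-- the memo invariant: every stored value is the A-result for its key
def MemoOK (m : PySem.Dict (List Int) (List (List Int))) : Prop :=
  ∀ k v, m.get? k = some v → v = sequences k

theorem seqLoopA_eq_flatMap (t : List Int) (hs : List {x // x ∈ t}) (a : List (List Int)) :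
    seqLoopA t hs a =
      a ++ hs.flatMap (fun h =>
        (sequences (t.filter (fun x => decide (x ≠ h.1)))).map (fun tail => h.1 :: tail)) := by
  induction hs generalizing a with
  | nil => simp [seqLoopA]
  | cons h rest ih => rw [seqLoopA, ih]; simp

theorem sequences_nil : sequences ([] : List Int) = [] := by
  rw [sequences]; simp [List.attach_nil, seqLoopA]

-- A's len==1 base case agrees with the general branch
theorem sequences_eq_loop (t : List Int) :
    sequences t = seqLoopA t t.attach (t.map (fun head => [head])) := by
  rw [sequences]
  split
  · next h1 =>
    obtain ⟨x, rfl⟩ := List.length_eq_one_iff.mp h1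
    rw [seqLoopA_eq_flatMap]
    have : ([x].filter (fun y => decide (y ≠ x))) = [] := by simp
    simp [sequences_nil]
  · rfl

theorem seqGo_correct :
    ∀ (n : ℕ) (t : List Int), t.length < n →
      ∀ m, MemoOK m → (seqGo m t).2 = sequences t ∧ MemoOK (seqGo m t).1 := by
  intro n
  induction n with
  | zero => intro t ht; omega
  | succ n ih =>
    intro t ht m hm
    rw [seqGo]
    split
    · next v hget => exact ⟨hm t v hget, hm⟩
    · next hget =>
      simp only
      -- the loop preserves the invariant and computes A's loop result
      have loop : ∀ (hs : List {x // x ∈ t}) (m' : PySem.Dict (List Int) (List (List Int)))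
          (acc : List (List Int)), MemoOK m' →
          (seqLoopB t hs (m', acc)).2 = seqLoopA t hs acc ∧ MemoOK (seqLoopB t hs (m', acc)).1 := by
        intro hs
        induction hs with
        | nil => intro m' acc hm'; simp [seqLoopB, seqLoopA]; exact hm'
        | cons h rest ihs =>
          intro m' acc hm'
          have hlt : (t.filter (fun x => decide (x ≠ h.1))).length < n := by
            have := pv_filter_ne_lt h.2
            omega
          obtain ⟨hv, hmOK⟩ := ih _ hlt m' hm'
          rw [seqLoopB, seqLoopA]
          simp only [hv]
          exact ihs _ _ hmOK
      obtain ⟨hv, hmOK⟩ := loop t.attach m (t.map (fun h => [h])) hm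
      rw [← sequences_eq_loop] at hv
      refine ⟨hv, ?_⟩
      intro k v hk
      rw [PySem.Dict.get?_insert] at hk
      split at hk
      · next hkt => cases hk; rw [hkt, hv]
      · exact hmOK k v hk

-- ===== VERDICT (by name: the statement is the Claim_ definition above) =====
theorem sequences_spec : Claim_equal_sequences := by
  intro free _
  unfold Spec_sequences sequences_alt
  have hempty : MemoOK PySem.Dict.empty := by
    intro k v hk
    simp [PySem.Dict.get?_empty] at hk
  exact ((seqGo_correct (free.length + 1) free (by omega) PySem.Dict.empty hempty).1).symm
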